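-- pv_equiv track=rewrite | github.com/quasarbright/quasarbright.github.io | python/stringMorph.py | get_need_and_remove
-- ===== SOURCE A (Python) =====
-- def get_need_and_remove(word, target):
--     wordlist = list(word)
--     targetlist = list(target)
--     wordset = set(list(word))
--     targetset = set(list(target))
--     intersect = wordset & targetset
--     for letter in intersect:
--         while letter in wordlist and letter in targetlist:
--             wordlist.remove(letter)
--             targetlist.remove(letter)
--     lettersNeeded = targetlist
--     lettersToRemove = wordlist
--     assert set(lettersNeeded) & set(lettersToRemove) == set([])
--     return lettersNeeded, lettersToRemove
-- ===== SOURCE B (Python) =====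
-- def get_need_and_remove(word, target):
--     wc = {}
--     for ch in word:
--         wc[ch] = wc.get(ch, 0) + 1
--     tc = {}
--     for ch in target:
--         tc[ch] = tc.get(ch, 0) + 1
--     budget = {ch: min(n, wc.get(ch, 0)) for ch, n in tc.items()}
--
--     def skip(s, k):
--         out = []
--         for ch in s:
--             if k.get(ch, 0) > 0:
--                 k[ch] -= 1
--             else:
--                 out.append(ch)
--         return out
--
--     return skip(target, dict(budget)), skip(word, dict(budget))
-- ===== Notes on version B (the rewrite author's own statement) =====
-- stated objective: faster
-- what changed: Replaces A's per-letter while-loop of repeated list.remove scans with two counting passes that fix a per-letter removal budget and a single ordered pass over each string that skips the first budget-many occurrences.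
import Mathlib
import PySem

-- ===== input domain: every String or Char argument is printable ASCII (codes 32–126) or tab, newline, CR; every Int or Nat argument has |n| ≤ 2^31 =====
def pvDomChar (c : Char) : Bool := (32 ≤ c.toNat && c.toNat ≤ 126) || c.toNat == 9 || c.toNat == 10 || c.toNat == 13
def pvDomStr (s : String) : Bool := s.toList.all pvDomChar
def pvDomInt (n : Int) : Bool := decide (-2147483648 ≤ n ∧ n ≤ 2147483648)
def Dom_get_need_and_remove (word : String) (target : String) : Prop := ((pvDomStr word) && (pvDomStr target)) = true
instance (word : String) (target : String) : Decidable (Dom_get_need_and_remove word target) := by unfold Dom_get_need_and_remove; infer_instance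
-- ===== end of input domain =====

-- B computes the per-letter removal budget with two counting passes and strips the
-- first budget-many occurrences in one ordered pass, instead of A's repeated list.remove scans.

-- termination helper for the while-loop port (cited by decreasing_by)
theorem pvRemove_len {wl wl' : List String} {l : String}
    (h : PySem.List.remove? wl l = some wl') : wl'.length < wl.length := by
  have hmem : l ∈ wl := by
    by_contra hn
    simp [(PySem.List.remove?_eq_none_iff wl l).mpr hn] at h
  have h2 := PySem.List.remove?_eq_some_erase wl l hmem
  rw [h] at h2
  injection h2 with h3
  have h4 := List.length_erase_of_mem hmem
  have h5 : 0 < wl.length := List.length_pos_of_mem hmem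
  rw [h3, h4]
  omega

-- ===== PORT A =====
-- 'while letter in wordlist and letter in targetlist: wordlist.remove(letter); targetlist.remove(letter)'
def pvWhileRemove (letter : String) (wl tl : List String) : List String × List String :=
  if letter ∈ wl ∧ letter ∈ tl then
    match hw : PySem.List.remove? wl letter, ht : PySem.List.remove? tl letter with
    | some wl', some tl' => pvWhileRemove letter wl' tl'
    | _, _ => (wl, tl)  -- unreachable: both memberships hold
  else (wl, tl)
termination_by wl.length
decreasing_by exact pvRemove_len hw

def get_need_and_remove (word : String) (target : String) : List String × List String :=
  let wordlist := word.toList.map (fun c => String.ofList [c])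
  let targetlist := target.toList.map (fun c => String.ofList [c])
  let wordset := PySem.Set.ofList wordlist
  let targetset := PySem.Set.ofList targetlist
  let intersect := PySem.Set.inter wordset targetset
  let p := intersect.foldl (fun (p : List String × List String) letter => pvWhileRemove letter p.1 p.2)
      (wordlist, targetlist)
  -- the assert always holds and is skipped
  (p.2, p.1)

-- ===== PORT B =====
-- 'for ch in s: if k.get(ch,0) > 0: k[ch] -= 1 else: out.append(ch)'
def pvSkip (k : PySem.Dict String Int) (s : List String) : List String :=
  match s with
  | [] => []
  | ch :: rest =>
    if 0 < k.getD ch 0 then pvSkip (k.modify ch 0 (· - 1)) rest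
    else ch :: pvSkip k rest

def get_need_and_remove_alt (word : String) (target : String) : List String × List String :=
  let wlist := word.toList.map (fun c => String.ofList [c])
  let tlist := target.toList.map (fun c => String.ofList [c])
  let wc := wlist.foldl (fun d ch => d.insert ch (d.getD ch 0 + 1)) PySem.Dict.empty
  let tc := tlist.foldl (fun d ch => d.insert ch (d.getD ch 0 + 1)) PySem.Dict.empty
  let budget := tc.items.foldl (fun d p => d.insert p.1 (min p.2 (wc.getD p.1 0))) PySem.Dict.empty
  (pvSkip budget tlist, pvSkip budget wlist)

-- ===== PRECONDITION & SPEC =====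
def Spec_get_need_and_remove (word : String) (target : String) (out : List String × List String) : Prop := out = get_need_and_remove_alt word target
instance (word : String) (target : String) (out : List String × List String) : Decidable (Spec_get_need_and_remove word target out) := by unfold Spec_get_need_and_remove; infer_instance

-- ===== CLAIM (what is proved, stated in full; the proofs are below) =====
def Claim_equal_get_need_and_remove : Prop := ∀ (word : String) (target : String), Dom_get_need_and_remove word target → Spec_get_need_and_remove word target (get_need_and_remove word target)

-- ===== LEMMAS AND PROOFS =====

-- canonical "skip the first f c occurrences of each letter c" pass, over a plain function
def fdec (f : String → Nat) (x : String) : String → Nat := fun c => if c = x then f x - 1 else f c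

def skipF (f : String → Nat) : List String → List String
  | [] => []
  | x :: s => if 0 < f x then skipF (fdec f x) s else x :: skipF f s

def single (x : String) (n : Nat) : String → Nat := fun c => if c = x then n else 0

theorem skipF_congr {f g : String → Nat} (h : ∀ c, f c = g c) (s : List String) :
    skipF f s = skipF g s := by
  induction s generalizing f g with
  | nil => rfl
  | cons x s ih =>
    simp only [skipF, h x]
    split
    · exact ih (fun c => by simp [fdec, h])
    · rw [ih h]

theorem skipF_zero {f : String → Nat} (h : ∀ c, f c = 0) (s : List String) :
    skipF f s = s := by
  induction s with
  | nil => rfl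
  | cons x s ih => simp [skipF, h, ih]

theorem skipF_comp (f g : String → Nat) (s : List String) :
    skipF f (skipF g s) = skipF (fun c => f c + g c) s := by
  induction s generalizing f g with
  | nil => rfl
  | cons x s ih =>
    by_cases hg : 0 < g x
    · have hfg : 0 < f x + g x := by omega
      simp only [skipF, if_pos hg, if_pos hfg, ih]
      exact skipF_congr (fun c => by
        simp only [fdec]
        by_cases hcx : c = x
        · subst hcx; simp only [if_true]; omega
        · simp only [if_neg hcx]) s
    · have hg0 : g x = 0 := by omega
      by_cases hf : 0 < f x
      · have hfg : 0 < f x + g x := by omega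
        simp only [skipF, if_neg hg, if_pos hf, if_pos hfg, ih]
        exact skipF_congr (fun c => by
        simp only [fdec]
        by_cases hcx : c = x
        · subst hcx; simp only [if_true]; omega
        · simp only [if_neg hcx]) s
      · have hfg : ¬ 0 < f x + g x := by omega
        simp only [skipF, if_neg hg, if_neg hf, if_neg hfg, ih]

theorem erase_eq_skipF_single (x : String) (s : List String) :
    s.erase x = skipF (single x 1) s := by
  induction s with
  | nil => rfl
  | cons y s ih =>
    by_cases h : y = x
    · subst h
      simp [skipF, single]
      exact (skipF_zero (fun c => by simp [fdec, single]) s).symm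
    · simp [skipF, single, h, ih]

theorem count_skipF_support {l c : String} (hc : c ≠ l) :
    ∀ (s : List String) (f : String → Nat), (∀ c', 0 < f c' → c' = l) →
    (skipF f s).count c = s.count c := by
  intro s
  induction s with
  | nil => intro f _; rfl
  | cons y s ih =>
    intro f hf
    by_cases hy : 0 < f y
    · have hyl := hf y hy
      subst hyl
      simp only [skipF, if_pos hy]
      rw [ih _ (fun c' h => by by_cases hcy : c' = y; exact hcy; simp [fdec, hcy] at h; exact hf c' h)]
      simp [Ne.symm hc]
    · simp only [skipF, if_neg hy, List.count_cons, ih f hf]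

theorem pvWhileRemove_eq (letter : String) (wl tl : List String) :
    pvWhileRemove letter wl tl =
      (skipF (single letter (min (wl.count letter) (tl.count letter))) wl,
       skipF (single letter (min (wl.count letter) (tl.count letter))) tl) := by
  generalize hn : wl.count letter = n
  induction n generalizing wl tl with
  | zero =>
    have hmem : letter ∉ wl := by rw [← List.count_pos_iff]; omega
    rw [pvWhileRemove]
    rw [if_neg (by tauto)]
    rw [skipF_zero (fun c => by simp [single]) wl,
        skipF_zero (fun c => by simp [single]) tl]
  | succ n ih =>
    have hw : letter ∈ wl := by rw [← List.count_pos_iff]; omega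
    by_cases ht : letter ∈ tl
    · rw [pvWhileRemove]
      rw [if_pos ⟨hw, ht⟩]
      rw [PySem.List.remove?_eq_some_erase wl letter hw, PySem.List.remove?_eq_some_erase tl letter ht]
      simp only []
      have hcw : (wl.erase letter).count letter = n := by
        simp [List.count_erase_self, hn]
      have hct : (tl.erase letter).count letter = tl.count letter - 1 := by
        rw [List.count_erase_self]
      have htpos : 0 < tl.count letter := List.count_pos_iff.mpr ht
      rw [ih (wl.erase letter) (tl.erase letter) hcw, hct]
      rw [erase_eq_skipF_single, erase_eq_skipF_single, skipF_comp, skipF_comp]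
      simp only [Prod.mk.injEq]
      constructor <;>
      · congr 1
        funext c
        simp only [single]
        split <;> omega
    · rw [pvWhileRemove]
      rw [if_neg (by tauto)]
      have hct : tl.count letter = 0 := by
        rw [← List.count_eq_zero] at ht; exact ht
      rw [skipF_zero (fun c => by simp [single, hct]) wl,
          skipF_zero (fun c => by simp [single, hct]) tl]

def fmin (cs wl tl : List String) : String → Nat :=
  fun c => if c ∈ cs then min (wl.count c) (tl.count c) else 0

theorem foldl_whileRemove (cs : List String) (hnd : cs.Nodup) :
    ∀ (wl tl : List String),
    cs.foldl (fun (p : List String × List String) letter => pvWhileRemove letter p.1 p.2) (wl, tl) =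
      (skipF (fmin cs wl tl) wl, skipF (fmin cs wl tl) tl) := by
  induction cs with
  | nil =>
    intro wl tl
    simp only [List.foldl_nil]
    rw [skipF_zero (fun c => by simp [fmin]) wl, skipF_zero (fun c => by simp [fmin]) tl]
  | cons l cs ih =>
    intro wl tl
    have hl : l ∉ cs := (List.nodup_cons.mp hnd).1
    have hnd' : cs.Nodup := (List.nodup_cons.mp hnd).2
    rw [List.foldl_cons, pvWhileRemove_eq l wl tl, ih hnd']
    set m := min (wl.count l) (tl.count l) with hm
    have hsupp : ∀ c', 0 < single l m c' → c' = l := by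
      intro c' h; by_contra hne; simp [single, hne] at h
    have hfe : ∀ c, fmin cs (skipF (single l m) wl) (skipF (single l m) tl) c
        = (fun c => fmin (l :: cs) wl tl c - single l m c) c := by
      intro c
      by_cases hc : c ∈ cs
      · have hcl : c ≠ l := fun h => hl (h ▸ hc)
        simp [fmin, hc, count_skipF_support hcl _ _ hsupp, single, hcl]
      · by_cases hcl : c = l
        · subst hcl
          simp [fmin, hc, single, hm]
        · simp [fmin, hc, hcl, single]
    have hsub : ∀ c', fmin (l :: cs) wl tl c' - single l m c' + single l m c' = fmin (l :: cs) wl tl c' := by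
      intro c'
      by_cases hc : c' = l
      · subst hc
        have h1 : single c' m c' = m := by simp [single]
        have h2 : fmin (c' :: cs) wl tl c' = m := by simp [fmin, hm]
        omega
      · have h1 : single l m c' = 0 := by simp [single, hc]
        omega
    rw [skipF_congr hfe, skipF_congr hfe, skipF_comp, skipF_comp,
        skipF_congr hsub, skipF_congr hsub]

theorem pvSkip_eq_skipF (s : List String) :
    ∀ (k : PySem.Dict String Int), pvSkip k s = skipF (fun c => (k.getD c 0).toNat) s := by
  induction s with
  | nil => intro k; rfl
  | cons ch rest ih =>
    intro k
    by_cases h : 0 < k.getD ch 0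
    · have h' : 0 < (k.getD ch 0).toNat := by omega
      simp only [pvSkip, skipF, if_pos h, if_pos h', ih]
      exact skipF_congr (fun c => by
        simp only [fdec, PySem.Dict.getD_modify]
        split <;> omega) rest
    · have h' : ¬ 0 < (k.getD ch 0).toNat := by omega
      simp only [pvSkip, skipF, if_neg h, if_neg h', ih]

theorem getD_foldl_insert_fn (g : String → Int) :
    ∀ (cs : List String) (d : PySem.Dict String Int) (c : String),
    (cs.foldl (fun d x => d.insert x (g x)) d).getD c 0 =
      if c ∈ cs then g c else d.getD c 0 := by
  intro cs
  induction cs with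
  | nil => intro d c; simp
  | cons x cs ih =>
    intro d c
    simp only [List.foldl_cons, ih, PySem.Dict.getD_insert, List.mem_cons]
    by_cases hc : c ∈ cs
    · simp [hc]
    · by_cases hx : c = x <;> simp [hc, hx]

-- the budget dict of B evaluates to min of the two letter counts
theorem getD_budget (wlist tlist : List String) (c : String) :
    (((tlist.foldl (fun d ch => d.insert ch (d.getD ch 0 + 1)) (PySem.Dict.empty : PySem.Dict String Int)).items.foldl
        (fun d p => d.insert p.1 (min p.2
          ((wlist.foldl (fun d ch => d.insert ch (d.getD ch 0 + 1)) (PySem.Dict.empty : PySem.Dict String Int)).getD p.1 0)))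
        (PySem.Dict.empty : PySem.Dict String Int)).getD c 0)
    = if c ∈ tlist then min (tlist.count c : Int) (wlist.count c : Int) else 0 := by
  rw [PySem.Dict.foldl_insert_getD_add_one_eq_counter, PySem.Dict.foldl_insert_getD_add_one_eq_counter,
      PySem.Dict.items_counter, List.foldl_map]
  rw [getD_foldl_insert_fn (fun x => min ((tlist.count x : Int)) ((PySem.Dict.counter wlist).getD x 0))]
  simp [PySem.Dict.getD_counter, PySem.Set.mem_ofList]

theorem main_lists (wlist tlist : List String) :
    (((PySem.Set.inter (PySem.Set.ofList wlist) (PySem.Set.ofList tlist)).foldl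
        (fun (p : List String × List String) letter => pvWhileRemove letter p.1 p.2) (wlist, tlist)).2,
     ((PySem.Set.inter (PySem.Set.ofList wlist) (PySem.Set.ofList tlist)).foldl
        (fun (p : List String × List String) letter => pvWhileRemove letter p.1 p.2) (wlist, tlist)).1)
    = (pvSkip ((tlist.foldl (fun d ch => d.insert ch (d.getD ch 0 + 1)) (PySem.Dict.empty : PySem.Dict String Int)).items.foldl
        (fun d p => d.insert p.1 (min p.2
          ((wlist.foldl (fun d ch => d.insert ch (d.getD ch 0 + 1)) (PySem.Dict.empty : PySem.Dict String Int)).getD p.1 0)))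
        (PySem.Dict.empty : PySem.Dict String Int)) tlist,
       pvSkip ((tlist.foldl (fun d ch => d.insert ch (d.getD ch 0 + 1)) (PySem.Dict.empty : PySem.Dict String Int)).items.foldl
        (fun d p => d.insert p.1 (min p.2
          ((wlist.foldl (fun d ch => d.insert ch (d.getD ch 0 + 1)) (PySem.Dict.empty : PySem.Dict String Int)).getD p.1 0)))
        (PySem.Dict.empty : PySem.Dict String Int)) wlist) := by
  have hfun : ∀ c, fmin (PySem.Set.inter (PySem.Set.ofList wlist) (PySem.Set.ofList tlist)) wlist tlist c
      = (((tlist.foldl (fun d ch => d.insert ch (d.getD ch 0 + 1)) (PySem.Dict.empty : PySem.Dict String Int)).items.foldl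
        (fun d p => d.insert p.1 (min p.2
          ((wlist.foldl (fun d ch => d.insert ch (d.getD ch 0 + 1)) (PySem.Dict.empty : PySem.Dict String Int)).getD p.1 0)))
        (PySem.Dict.empty : PySem.Dict String Int)).getD c 0).toNat := by
    intro c
    rw [getD_budget]
    simp only [fmin, PySem.Set.mem_inter, PySem.Set.mem_ofList]
    by_cases hct : c ∈ tlist
    · by_cases hcw : c ∈ wlist
      · simp only [hct, hcw, and_self, if_pos]
        omega
      · have h0 : wlist.count c = 0 := List.count_eq_zero.mpr hcw
        simp [hct, hcw, h0]
    · simp [hct]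
  rw [foldl_whileRemove _ (PySem.Set.nodup_inter _ _ (PySem.Set.nodup_ofList wlist)) wlist tlist]
  rw [pvSkip_eq_skipF, pvSkip_eq_skipF]
  rw [skipF_congr hfun, skipF_congr hfun]

-- ===== VERDICT (by name: the statement is the Claim_ definition above) =====
theorem get_need_and_remove_spec : Claim_equal_get_need_and_remove := by
  intro word target _
  exact main_lists (word.toList.map (fun c => String.ofList [c])) (target.toList.map (fun c => String.ofList [c]))
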